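-- pv_equiv track=rewrite | github.com/SeungYupYum/Personal-Project | Web Crawler & Search Engine/Web Crawler/crawler.py | has_repeating_sub_directories
-- ===== SOURCE A (Python) =====
-- def has_repeating_sub_directories(url):
--     """
--     Check for repeating sub-dirctories.
--     Example: https://example.com/a/a/a/a/b/b/b/a/index.html
--
--     Tokenize by '/' and count word by using dictionary
--     If frequency of one word is over 3, then treat as repeating_sub_directories
--     """
--     directories = url.split("/")
--     directory_count = {}
--
--     for directory in directories:
--         if directory in directory_count:
--             directory_count[directory] += 1
--         else:
--             directory_count[directory] = 1
--
--         if directory_count[directory] > 3: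
--             return True
--
--     return False
-- ===== SOURCE B (Python) =====
-- def has_repeating_sub_directories(url):
--     tokens = sorted(url.split("/"))
--     cur = None
--     run = 0
--     for t in tokens:
--         if t == cur:
--             run += 1
--         else:
--             cur = t
--             run = 1
--         if run > 3:
--             return True
--     return False
-- ===== Notes on version B (the rewrite author's own statement) =====
-- stated objective: alternative
-- what changed: Replaces the dictionary-of-counts built while scanning with a sort-then-single-pass run-length scan: after sorting the tokens, equal tokens are adjacent, so a consecutive run longer than 3 exists iff some token occurs more than 3 times.
import Mathlib
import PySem

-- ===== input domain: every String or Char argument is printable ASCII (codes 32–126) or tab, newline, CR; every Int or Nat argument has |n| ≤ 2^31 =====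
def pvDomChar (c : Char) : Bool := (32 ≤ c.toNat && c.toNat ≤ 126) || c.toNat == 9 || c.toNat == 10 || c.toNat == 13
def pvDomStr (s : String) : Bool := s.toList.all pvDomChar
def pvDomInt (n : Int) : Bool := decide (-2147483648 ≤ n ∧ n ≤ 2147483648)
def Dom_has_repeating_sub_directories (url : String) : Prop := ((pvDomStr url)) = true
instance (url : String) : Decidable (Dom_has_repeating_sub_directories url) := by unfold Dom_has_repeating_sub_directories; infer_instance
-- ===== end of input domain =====

-- B replaces A's count-dictionary scan with sort-then-run-length; same result, alternative algorithm.

-- ===== PORT A =====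
-- the for-loop over the tokens with the count dictionary and the early `return True`
def pvALoop : List String → PySem.Dict String Int → Bool
  | [], _ => false
  | d :: rest, cnt =>
      let cnt' := if cnt.contains d then cnt.insert d (cnt.getD d 0 + 1) else cnt.insert d 1
      if cnt'.getD d 0 > 3 then true else pvALoop rest cnt'

-- url.split("/"): the separator "/" is a nonempty literal, so split? is always `some`
def has_repeating_sub_directories (url : String) : Bool :=
  pvALoop ((PySem.Str.split? url "/").getD []) PySem.Dict.empty

-- ===== PORT B =====
-- the run-length loop over the sorted tokens (cur starts as Python's None)
def pvBLoop : Option String → Int → List String → Bool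
  | _, _, [] => false
  | cur, run, t :: rest =>
      let s := if some t = cur then (cur, run + 1) else (some t, (1 : Int))
      if s.2 > 3 then true else pvBLoop s.1 s.2 rest

def has_repeating_sub_directories_alt (url : String) : Bool :=
  pvBLoop none 0 (PySem.List.sorted ((PySem.Str.split? url "/").getD []) (fun x => x) false)

-- ===== PRECONDITION & SPEC =====
def Spec_has_repeating_sub_directories (url : String) (out : Bool) : Prop := out = has_repeating_sub_directories_alt url
instance (url : String) (out : Bool) : Decidable (Spec_has_repeating_sub_directories url out) := by unfold Spec_has_repeating_sub_directories; infer_instance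

-- ===== CLAIM (what is proved, stated in full; the proofs are below) =====
def Claim_equal_has_repeating_sub_directories : Prop := ∀ (url : String), Dom_has_repeating_sub_directories url → Spec_has_repeating_sub_directories url (has_repeating_sub_directories url)

-- ===== LEMMAS AND PROOFS =====

-- one step of A's loop, with the updated dictionary described pointwise
theorem pvALoop_step (rest : List String) (d : String) (cnt c' : PySem.Dict String Int)
    (hc' : ∀ x, c'.getD x 0 = if x = d then cnt.getD d 0 + 1 else cnt.getD x 0)
    (ih : pvALoop rest c' = true ↔ ∃ x ∈ rest, 4 ≤ c'.getD x 0 + (rest.count x : Int)) :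
    ((if c'.getD d 0 > 3 then true else pvALoop rest c') = true ↔
      ∃ x ∈ d :: rest, 4 ≤ cnt.getD x 0 + ((d :: rest).count x : Int)) := by
  have hgd : c'.getD d 0 = cnt.getD d 0 + 1 := by
    have := hc' d; simpa using this
  have hcntd : (d :: rest).count d = rest.count d + 1 := by simp [List.count_cons]
  by_cases h4 : c'.getD d 0 > 3
  · simp only [h4, if_true, true_iff]
    refine ⟨d, List.mem_cons_self, ?_⟩
    rw [hcntd]; push_cast; omega
  · simp only [h4, if_false]
    rw [ih]
    constructor
    · rintro ⟨x, hx, hle⟩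
      by_cases hxd : x = d
      · rw [hxd] at hx hle
        refine ⟨d, List.mem_cons_of_mem _ hx, ?_⟩
        rw [hcntd]; push_cast at hle ⊢; omega
      · have hgx : c'.getD x 0 = cnt.getD x 0 := by
          have := hc' x; simpa [hxd] using this
        refine ⟨x, List.mem_cons_of_mem _ hx, ?_⟩
        have hcnt : (d :: rest).count x = rest.count x := by
          simp [List.count_cons, Ne.symm hxd]
        rw [hcnt, ← hgx]; exact hle
    · rintro ⟨x, hx, hle⟩
      by_cases hxd : x = d
      · rw [hxd] at hle
        have hdm : d ∈ rest := by
          by_contra hnm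
          have hz : rest.count d = 0 := List.count_eq_zero_of_not_mem hnm
          rw [hcntd, hz] at hle
          push_cast at hle; omega
        refine ⟨d, hdm, ?_⟩
        rw [hcntd] at hle
        push_cast at hle ⊢; omega
      · have hxm : x ∈ rest := by
          rcases List.mem_cons.mp hx with h | h
          · exact absurd h hxd
          · exact h
        have hgx : c'.getD x 0 = cnt.getD x 0 := by
          have := hc' x; simpa [hxd] using this
        refine ⟨x, hxm, ?_⟩
        have hcnt : (d :: rest).count x = rest.count x := by
          simp [List.count_cons, Ne.symm hxd]
        rw [hcnt] at hle
        rw [hgx]; exact hle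
-- A's loop returns true iff some remaining token's running total reaches 4.
theorem pvALoop_iff (ts : List String) (cnt : PySem.Dict String Int) :
    pvALoop ts cnt = true ↔ ∃ x ∈ ts, 4 ≤ cnt.getD x 0 + (ts.count x : Int) := by
  induction ts generalizing cnt with
  | nil => simp [pvALoop]
  | cons d rest ih =>
    by_cases hcon : cnt.contains d
    · have h := pvALoop_step rest d cnt (cnt.insert d (cnt.getD d 0 + 1))
        (by intro x; rw [PySem.Dict.getD_insert]) (ih _)
      simpa [pvALoop, hcon] using h
    · have h0 : cnt.getD d 0 = 0 :=
        PySem.Dict.getD_of_not_contains cnt 0 (by simpa using hcon)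
      have h := pvALoop_step rest d cnt (cnt.insert d 1)
        (by intro x; rw [PySem.Dict.getD_insert, h0]; split <;> simp) (ih _)
      simpa [pvALoop, hcon] using h

-- B's loop on a sorted tail: true iff the current run completes to 4 or a later token occurs 4 times.
theorem pvBLoop_iff (ts : List String) (c : String) (r : Int)
    (hs : ts.Pairwise (· ≤ ·)) (hge : ∀ x ∈ ts, c ≤ x) (hr : 1 ≤ r) (hr3 : r ≤ 3) :
    pvBLoop (some c) r ts = true ↔
      (4 ≤ r + (ts.count c : Int)) ∨ ∃ x ∈ ts, x ≠ c ∧ 4 ≤ ts.count x := by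
  induction ts generalizing c r with
  | nil =>
    simp only [pvBLoop]
    constructor
    · intro h; exact absurd h (by simp)
    · rintro (h | ⟨x, hx, _⟩)
      · simp at h; omega
      · simp at hx
  | cons t rest ih =>
    rcases List.pairwise_cons.mp hs with ⟨hthead, hrest⟩
    by_cases htc : t = c
    · rw [htc]
      have hcnt : (c :: rest).count c = rest.count c + 1 := by simp [List.count_cons]
      by_cases h4 : (r + 1 : Int) > 3
      · have hL : pvBLoop (some c) r (c :: rest) = true := by
          simp [pvBLoop, h4]
        rw [hL]
        simp only [true_iff]
        left; rw [hcnt]; push_cast; omega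
      · have hL : pvBLoop (some c) r (c :: rest) = pvBLoop (some c) (r + 1) rest := by
          simp [pvBLoop, h4]
        rw [htc] at hthead
        rw [hL, ih c (r + 1) hrest hthead (by omega) (by omega)]
        constructor
        · rintro (h | ⟨x, hx, hxc, hle⟩)
          · left; rw [hcnt]; push_cast; omega
          · right
            refine ⟨x, List.mem_cons_of_mem _ hx, hxc, ?_⟩
            have : (c :: rest).count x = rest.count x := by
              simp [List.count_cons, Ne.symm hxc]
            omega
        · rintro (h | ⟨x, hx, hxc, hle⟩)
          · left; rw [hcnt] at h; push_cast at h ⊢; omega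
          · right
            have hxm : x ∈ rest := by
              rcases List.mem_cons.mp hx with h' | h'
              · exact absurd h' hxc
              · exact h'
            refine ⟨x, hxm, hxc, ?_⟩
            have : (c :: rest).count x = rest.count x := by
              simp [List.count_cons, Ne.symm hxc]
            omega
    · have hct : c < t := lt_of_le_of_ne (hge t List.mem_cons_self) (fun h => htc h.symm)
      have hcrest : c ∉ rest := fun hm => absurd (lt_of_lt_of_le hct (hthead c hm)) (lt_irrefl c)
      have hcv : c ≠ t := ne_of_lt hct
      have hcnt0 : (t :: rest).count c = 0 := by
        simp [List.count_cons, List.count_eq_zero_of_not_mem hcrest, hcv, htc]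
      have hL : pvBLoop (some c) r (t :: rest) = pvBLoop (some t) 1 rest := by
        have hne : ¬ (some t = some c) := by simpa using htc
        simp [pvBLoop, hne]
      rw [hL, ih t 1 hrest hthead (by omega) (by omega)]
      have hcntt : (t :: rest).count t = rest.count t + 1 := by simp [List.count_cons]
      constructor
      · rintro (h | ⟨x, hx, hxt, hle⟩)
        · right
          refine ⟨t, List.mem_cons_self, htc, ?_⟩
          rw [hcntt]; push_cast at h ⊢; omega
        · right
          have hxc : x ≠ c := fun he => hcrest (he ▸ hx)
          refine ⟨x, List.mem_cons_of_mem _ hx, hxc, ?_⟩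
          have : (t :: rest).count x = rest.count x := by simp [List.count_cons, Ne.symm hxt]
          omega
      · rintro (h | ⟨x, hx, hxc, hle⟩)
        · rw [hcnt0] at h; push_cast at h; omega
        · by_cases hxt : x = t
          · rw [hxt] at hle
            left; rw [hcntt] at hle; push_cast at hle ⊢; omega
          · right
            have hxm : x ∈ rest := by
              rcases List.mem_cons.mp hx with h' | h'
              · exact absurd h' hxt
              · exact h'
            refine ⟨x, hxm, hxt, ?_⟩
            have : (t :: rest).count x = rest.count x := by simp [List.count_cons, Ne.symm hxt]
            omega

-- B on any token list: true iff some token occurs at least 4 times.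
theorem pvB_iff (l : List String) :
    pvBLoop none 0 (PySem.List.sorted l (fun x => x) false) = true ↔
      ∃ x ∈ l, 4 ≤ l.count x := by
  have hperm := PySem.List.sorted_perm l (fun x => x) false
  have hpw : (PySem.List.sorted l (fun x => x) false).Pairwise (· ≤ ·) := by
    simpa using PySem.List.sorted_pairwise l (fun x => x)
  have hmem : ∀ x, x ∈ PySem.List.sorted l (fun x => x) false ↔ x ∈ l :=
    fun x => hperm.mem_iff
  have hcount : ∀ x, (PySem.List.sorted l (fun x => x) false).count x = l.count x :=
    fun x => hperm.count_eq x
  cases hsl : PySem.List.sorted l (fun x => x) false with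
  | nil =>
    simp only [pvBLoop]
    constructor
    · intro h; exact absurd h (by simp)
    · rintro ⟨x, hx, _⟩
      rw [← hmem x, hsl] at hx
      simp at hx
  | cons t rest =>
    rw [hsl] at hpw hmem hcount
    rcases List.pairwise_cons.mp hpw with ⟨hthead, hrest⟩
    have hL : pvBLoop none 0 (t :: rest) = pvBLoop (some t) 1 rest := by
      simp [pvBLoop]
    rw [hL, pvBLoop_iff rest t 1 hrest hthead (by omega) (by omega)]
    have hcntt : (t :: rest).count t = rest.count t + 1 := by simp [List.count_cons]
    constructor
    · rintro (h | ⟨x, hx, hxt, hle⟩)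
      · refine ⟨t, (hmem t).mp List.mem_cons_self, ?_⟩
        rw [← hcount t, hcntt]; push_cast at h ⊢; omega
      · refine ⟨x, (hmem x).mp (List.mem_cons_of_mem _ hx), ?_⟩
        rw [← hcount x]
        have : (t :: rest).count x = rest.count x := by simp [List.count_cons, Ne.symm hxt]
        omega
    · rintro ⟨x, hx, hle⟩
      rw [← hcount x] at hle
      rcases List.mem_cons.mp ((hmem x).mpr hx) with h' | h'
      · rw [h'] at hle
        left; rw [hcntt] at hle; push_cast at hle ⊢; omega
      · by_cases hxt : x = t
        · rw [hxt] at hle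
          left; rw [hcntt] at hle; push_cast at hle ⊢; omega
        · right
          refine ⟨x, h', hxt, ?_⟩
          have : (t :: rest).count x = rest.count x := by simp [List.count_cons, Ne.symm hxt]
          omega

-- ===== VERDICT (by name: the statement is the Claim_ definition above) =====
theorem has_repeating_sub_directories_spec : Claim_equal_has_repeating_sub_directories := by
  intro url _
  unfold Spec_has_repeating_sub_directories
  unfold has_repeating_sub_directories has_repeating_sub_directories_alt
  set l := (PySem.Str.split? url "/").getD [] with hl
  have hA : pvALoop l PySem.Dict.empty = true ↔ ∃ x ∈ l, 4 ≤ l.count x := by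
    rw [pvALoop_iff]
    constructor
    · rintro ⟨x, hx, hle⟩
      rw [PySem.Dict.getD_empty] at hle
      exact ⟨x, hx, by exact_mod_cast (by omega : (4 : Int) ≤ (l.count x : Int))⟩
    · rintro ⟨x, hx, hle⟩
      refine ⟨x, hx, ?_⟩
      rw [PySem.Dict.getD_empty]
      have : (4 : Int) ≤ (l.count x : Int) := by exact_mod_cast hle
      omega
  apply Bool.eq_iff_iff.mpr
  rw [hA, pvB_iff]
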